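-- pv_equiv track=rewrite | github.com/pabloschwarzenberg/grader | tema11_ej2/tema11_ej2_39de4068a677ffd112d4b0a1c5a365b5.py | validar_expresion
-- ===== SOURCE A (Python) =====
-- def validar_expresion(expresion):
--     aux = "+-"
--     if expresion[0] in aux:
--         return False
--     if expresion=="2+3" or expresion=="2-3":
--         return True
--     if expresion[0] not in aux:
--         return validar_expresion(expresion[1:])
--     return validar_expresion(expresion[1:])
-- ===== SOURCE B (Python) =====
-- def validar_expresion(expresion):
--     aux = "+-"
--     return ((expresion.endswith("2+3") or expresion.endswith("2-3"))
--             and all(c not in aux for c in expresion[:-2]))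
-- ===== Notes on version B (the rewrite author's own statement) =====
-- stated objective: simpler
-- what changed: Replaces A's character-by-character recursion over shrinking suffixes with a single closed-form check: the string must end in one of the two accepted three-character expressions and contain no plus/minus sign before that final operator.
import Mathlib
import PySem

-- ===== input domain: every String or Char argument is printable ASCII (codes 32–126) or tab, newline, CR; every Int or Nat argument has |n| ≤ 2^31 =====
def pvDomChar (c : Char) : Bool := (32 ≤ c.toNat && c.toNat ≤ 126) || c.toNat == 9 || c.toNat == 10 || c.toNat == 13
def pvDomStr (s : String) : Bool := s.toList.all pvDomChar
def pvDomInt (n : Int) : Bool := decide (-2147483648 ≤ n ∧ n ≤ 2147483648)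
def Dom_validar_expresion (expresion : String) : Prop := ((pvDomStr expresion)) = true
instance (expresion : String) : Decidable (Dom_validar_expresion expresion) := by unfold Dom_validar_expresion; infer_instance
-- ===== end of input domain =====

-- B replaces A's suffix-by-suffix recursion by one closed-form check (endswith one of the two accepted expressions, no earlier sign).
-- A raises IndexError on strings containing no sign character; those inputs are excluded by Pre_ (B returns False there).

-- ===== PORT A =====
-- literal transliteration of A's recursion, over the code points of the string
def pvGoA : List Char → Bool
  | [] => false  -- Python: expresion[0] raises IndexError here; excluded by Pre_validar_expresion
  | c :: rest =>
    if c = '+' ∨ c = '-' then false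
    else if (c :: rest) = ['2', '+', '3'] ∨ (c :: rest) = ['2', '-', '3'] then true
    else if ¬ (c = '+' ∨ c = '-') then pvGoA rest
    else pvGoA rest

def validar_expresion (expresion : String) : Bool := pvGoA expresion.toList

-- ===== PORT B =====
def pvAltL (l : List Char) : Bool :=
  (PySem.Chars.endswith l ['2', '+', '3'] || PySem.Chars.endswith l ['2', '-', '3'])
    && (PySem.List.slice l none (some (-2))).all (fun c => !(c = '+' ∨ c = '-'))

def validar_expresion_alt (expresion : String) : Bool := pvAltL expresion.toList

-- ===== PRECONDITION & SPEC =====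
-- Pre_ excludes exactly the inputs on which A raises IndexError (no sign character anywhere).
def Pre_validar_expresion (expresion : String) : Prop :=
  '+' ∈ expresion.toList ∨ '-' ∈ expresion.toList
instance (expresion : String) : Decidable (Pre_validar_expresion expresion) := by
  unfold Pre_validar_expresion; infer_instance

def pvWitness_validar_expresion : String := "2+3"

def Spec_validar_expresion (expresion : String) (out : Bool) : Prop := out = validar_expresion_alt expresion
instance (expresion : String) (out : Bool) : Decidable (Spec_validar_expresion expresion out) := by unfold Spec_validar_expresion; infer_instance

-- ===== CLAIM (what is proved, stated in full; the proofs are below) =====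
def Claim_equal_validar_expresion : Prop := ∀ (expresion : String), Dom_validar_expresion expresion → Pre_validar_expresion expresion → Spec_validar_expresion expresion (validar_expresion expresion)

-- ===== LEMMAS AND PROOFS =====

-- the common characterisation both ports are reduced to
def pvP (l : List Char) : Prop :=
  (['2', '+', '3'] <:+ l ∨ ['2', '-', '3'] <:+ l) ∧
    ∀ c ∈ l.take (l.length - 2), ¬(c = '+' ∨ c = '-')

lemma pvAltL_iff (l : List Char) : pvAltL l = true ↔ pvP l := by
  simp [pvAltL, pvP, PySem.Chars.endswith_iff,
    PySem.List.slice_to_neg_ofNat l 2 (by omega), List.all_eq_true]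

lemma pvP_cons (c : Char) (rest : List Char)
    (hc : ¬(c = '+' ∨ c = '-'))
    (h1 : c :: rest ≠ ['2', '+', '3']) (h2 : c :: rest ≠ ['2', '-', '3']) :
    pvP (c :: rest) ↔ pvP rest := by
  by_cases hlen : 2 ≤ rest.length
  · have htake : (c :: rest).length - 2 = (rest.length - 2) + 1 := by
      simp; omega
    unfold pvP
    rw [htake, List.take_succ_cons]
    constructor
    · rintro ⟨hs, hall⟩
      refine ⟨?_, fun x hx => hall x (List.mem_cons_of_mem _ hx)⟩
      rcases hs with hs | hs
      · rcases (List.suffix_cons_iff.mp hs) with h | h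
        · exact absurd h.symm h1
        · exact Or.inl h
      · rcases (List.suffix_cons_iff.mp hs) with h | h
        · exact absurd h.symm h2
        · exact Or.inr h
    · rintro ⟨hs, hall⟩
      refine ⟨?_, ?_⟩
      · rcases hs with hs | hs
        · exact Or.inl (hs.trans (List.suffix_cons c rest))
        · exact Or.inr (hs.trans (List.suffix_cons c rest))
      · intro x hx
        rcases List.mem_cons.mp hx with rfl | hx
        · exact hc
        · exact hall x hx
  · constructor
    · rintro ⟨hs, -⟩
      exfalso
      rcases hs with hs | hs <;> have := hs.length_le <;> simp at this <;> omega
    · rintro ⟨hs, -⟩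
      exfalso
      rcases hs with hs | hs <;> have := hs.length_le <;> simp at this <;> omega

lemma pvP_head_op (c : Char) (rest : List Char) (hc : c = '+' ∨ c = '-') :
    ¬ pvP (c :: rest) := by
  rintro ⟨hs, hall⟩
  have hlen : 2 ≤ rest.length := by
    rcases hs with hs | hs <;> have := hs.length_le <;> simp at this <;> omega
  have htake : (c :: rest).length - 2 = (rest.length - 2) + 1 := by
    simp; omega
  apply hall c _ hc
  rw [htake, List.take_succ_cons]
  exact List.mem_cons_self

lemma pvGoA_iff (l : List Char) (hpre : '+' ∈ l ∨ '-' ∈ l) :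
    pvGoA l = true ↔ pvP l := by
  induction l with
  | nil => simp at hpre
  | cons c rest ih =>
    by_cases hc : c = '+' ∨ c = '-'
    · rw [pvGoA]
      simp only [if_pos hc]
      simp [pvP_head_op c rest hc]
    · by_cases h1 : c :: rest = ['2', '+', '3']
      · rw [h1]
        constructor
        · intro _; exact ⟨Or.inl (List.suffix_refl _), by simp⟩
        · intro _; decide
      · by_cases h2 : c :: rest = ['2', '-', '3']
        · rw [h2]
          constructor
          · intro _; exact ⟨Or.inr (List.suffix_refl _), by simp⟩
          · intro _; decide
        · have hpre' : '+' ∈ rest ∨ '-' ∈ rest := by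
            rcases hpre with h | h <;>
              rcases List.mem_cons.mp h with rfl | h
            · exact absurd (Or.inl rfl) hc
            · exact Or.inl h
            · exact absurd (Or.inr rfl) hc
            · exact Or.inr h
          rw [pvGoA]
          simp only [if_neg hc, if_neg (by simp [h1, h2] : ¬(c :: rest = ['2','+','3'] ∨ c :: rest = ['2','-','3'])), if_pos hc]
          rw [ih hpre', pvP_cons c rest hc h1 h2]

-- ===== VERDICT (by name: the statement is the Claim_ definition above) =====
theorem validar_expresion_spec : Claim_equal_validar_expresion := by
  intro e _ hpre
  unfold Spec_validar_expresion validar_expresion validar_expresion_alt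
  exact Bool.eq_iff_iff.mpr ((pvGoA_iff e.toList hpre).trans (pvAltL_iff e.toList).symm)
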